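-- pv_equiv track=rewrite | github.com/hugo-brb/Cryptographie | CBC.py | decrypt_cbc_caesar
-- ===== SOURCE A (Python) =====
-- def decrypt_cbc_caesar(ciphertext, key, iv, alphabet):
--     # Convertir chaque lettre chiffrée en sa représentation numérique
--     cipher_numbers = [alphabet[char] for char in ciphertext]
--     plaintext_numbers = []
--
--     # Initialiser le bloc précédent avec le vecteur d'initialisation (iv)
--     previous_cipher = iv
--
--     # Déchiffrement en mode CBC
--     for c in cipher_numbers:
--         # P_i = (C_i ⊕ C_{i-1} ⊕ k) mod 26
--         p = (c - key - previous_cipher) % 26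
--         plaintext_numbers.append(p)
--
--         # Mettre à jour le bloc précédent pour le prochain tour
--         previous_cipher = c
--
--     # Convertir les nombres en lettres
--     plaintext = ''.join(chr(65 + num) for num in plaintext_numbers)
--     return plaintext
-- ===== SOURCE B (Python) =====
-- def decrypt_cbc_caesar(ciphertext, key, iv, alphabet):
--     # Build the plaintext back-to-front by direct random access: the character at
--     # position i depends only on ciphertext[i] and ciphertext[i-1] (or iv at i=0),
--     # so no state needs to be threaded and no numeric list precomputed.
--     out = []
--     for i in range(len(ciphertext) - 1, -1, -1):
--         prev = iv if i == 0 else alphabet[ciphertext[i - 1]]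
--         out.append(chr(65 + (alphabet[ciphertext[i]] - key - prev) % 26))
--     return ''.join(reversed(out))
-- ===== Notes on version B (the rewrite author's own statement) =====
-- stated objective: alternative
-- what changed: Replaces A's forward pass that precomputes a numeric list and threads a previous_cipher accumulator by a stateless backwards index loop that random-accesses ciphertext[i] and ciphertext[i-1] directly (iv at i=0), appends the decrypted chars in reverse and reverses the result at the end.
import Mathlib
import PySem

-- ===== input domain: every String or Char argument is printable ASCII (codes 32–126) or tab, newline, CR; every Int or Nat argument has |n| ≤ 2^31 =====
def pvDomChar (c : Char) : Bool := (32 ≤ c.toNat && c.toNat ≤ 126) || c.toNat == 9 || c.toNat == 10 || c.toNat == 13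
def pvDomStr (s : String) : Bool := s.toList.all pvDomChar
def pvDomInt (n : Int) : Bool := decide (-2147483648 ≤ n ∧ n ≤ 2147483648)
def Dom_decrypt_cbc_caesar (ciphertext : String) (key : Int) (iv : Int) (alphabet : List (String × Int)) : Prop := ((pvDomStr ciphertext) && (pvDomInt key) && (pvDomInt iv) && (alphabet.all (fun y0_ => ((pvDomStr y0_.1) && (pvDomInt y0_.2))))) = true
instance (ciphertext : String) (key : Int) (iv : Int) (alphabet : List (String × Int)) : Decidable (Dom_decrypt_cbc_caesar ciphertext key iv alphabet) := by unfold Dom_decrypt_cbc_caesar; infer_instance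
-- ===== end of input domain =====

-- B replaces A's forward accumulator pass (precomputed numeric list + threaded
-- previous_cipher) by a stateless backwards index loop that random-accesses
-- ciphertext[i] and ciphertext[i-1] directly and reverses at the end; return-value
-- equivalence is proved on Pre_ (every ciphertext char is a key of alphabet —
-- Python A raises KeyError otherwise).

-- ===== PORT A =====
def decrypt_cbc_caesar (ciphertext : String) (key : Int) (iv : Int) (alphabet : List (String × Int)) : String :=
  -- cipher_numbers = [alphabet[char] for char in ciphertext]  (KeyError excluded by Pre_)
  let cipher_numbers : List Int :=
    ciphertext.toList.map (fun ch => (PySem.Dict.mk alphabet).getD (String.mk [ch]) 0)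
  -- for c in cipher_numbers: append (c - key - previous_cipher) % 26; previous_cipher = c
  let st := cipher_numbers.foldl
    (fun (st : List Int × Int) c => (st.1 ++ [PySem.Int.mod (c - key - st.2) 26], c))
    ([], iv)
  String.mk (st.1.map (fun num => Char.ofNat (65 + num).toNat))

-- ===== PORT B =====
def decrypt_cbc_caesar_alt (ciphertext : String) (key : Int) (iv : Int) (alphabet : List (String × Int)) : String :=
  let cs := ciphertext.toList
  -- for i in range(len(ciphertext) - 1, -1, -1): out.append(chr(65 + (alphabet[ct[i]] - key - prev) % 26))
  let out : List Char := (PySem.List.pyRange ((cs.length : Int) - 1) (-1) (-1)).foldl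
    (fun acc i =>
      let prev : Int := if i = 0 then iv
        else (PySem.Dict.mk alphabet).getD (String.mk [PySem.List.pyGetD cs (i - 1) ' ']) 0
      acc ++ [Char.ofNat (65 + PySem.Int.mod
        ((PySem.Dict.mk alphabet).getD (String.mk [PySem.List.pyGetD cs i ' ']) 0 - key - prev) 26).toNat])
    []
  -- ''.join(reversed(out))
  String.mk out.reverse

-- ===== PRECONDITION & SPEC =====
-- Pre_: every character of ciphertext is a key of alphabet; Python A raises KeyError otherwise.
def Pre_decrypt_cbc_caesar (ciphertext : String) (key : Int) (iv : Int) (alphabet : List (String × Int)) : Prop :=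
  ciphertext.toList.countP (fun ch => !(PySem.Dict.mk alphabet).contains (String.mk [ch])) = 0
instance (ciphertext : String) (key : Int) (iv : Int) (alphabet : List (String × Int)) : Decidable (Pre_decrypt_cbc_caesar ciphertext key iv alphabet) := by unfold Pre_decrypt_cbc_caesar; infer_instance

def pvWitness_decrypt_cbc_caesar : String × Int × Int × (List (String × Int)) :=
  ("AB", 3, 5, [("A", 0), ("B", 1)])

def Spec_decrypt_cbc_caesar (ciphertext : String) (key : Int) (iv : Int) (alphabet : List (String × Int)) (out : String) : Prop := out = decrypt_cbc_caesar_alt ciphertext key iv alphabet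
instance (ciphertext : String) (key : Int) (iv : Int) (alphabet : List (String × Int)) (out : String) : Decidable (Spec_decrypt_cbc_caesar ciphertext key iv alphabet out) := by unfold Spec_decrypt_cbc_caesar; infer_instance

-- ===== CLAIM (what is proved, stated in full; the proofs are below) =====
def Claim_equal_decrypt_cbc_caesar : Prop := ∀ (ciphertext : String) (key : Int) (iv : Int) (alphabet : List (String × Int)), Dom_decrypt_cbc_caesar ciphertext key iv alphabet → Pre_decrypt_cbc_caesar ciphertext key iv alphabet → Spec_decrypt_cbc_caesar ciphertext key iv alphabet (decrypt_cbc_caesar ciphertext key iv alphabet)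

-- ===== LEMMAS AND PROOFS =====

-- A's accumulator loop in zip-with-shift form (over the numeric list).
theorem cbc_foldl_eq_zip (key : Int) :
    ∀ (l acc : List Int) (iv : Int),
      (l.foldl (fun (st : List Int × Int) c => (st.1 ++ [PySem.Int.mod (c - key - st.2) 26], c)) (acc, iv)).1
        = acc ++ (l.zip (iv :: l.dropLast)).map (fun q => PySem.Int.mod (q.1 - key - q.2) 26) := by
  intro l
  induction l with
  | nil => intro acc iv; simp
  | cons c cs ih =>
    intro acc iv
    simp only [List.foldl_cons, ih]
    have hzip : cs.zip ((c :: cs).dropLast) = cs.zip (c :: cs.dropLast) := by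
      cases cs with
      | nil => simp
      | cons d ds => rfl
    simp [hzip, List.zip_cons_cons]

-- Index formulation (B, after unrolling the countdown range) equals the zip
-- formulation (A) — one induction over the character list, generalizing iv.
theorem pyRange_one_shift (a b : Int) :
    PySem.List.pyRange (a + 1) (b + 1) 1 = (PySem.List.pyRange a b 1).map (· + 1) := by
  rw [PySem.List.pyRange_one, PySem.List.pyRange_one, List.map_map]
  have : b + 1 - (a + 1) = b - a := by ring
  rw [this]
  apply List.map_congr_left
  intro k _
  simp only [Function.comp_apply]
  ring

theorem cbc_index_eq_zip (lk : Char → Int) (g : Int → Int → Char) (d : Char) :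
    ∀ (cs : List Char) (iv : Int),
      (PySem.List.pyRange 0 (cs.length : Int) 1).map (fun i =>
          g (lk (PySem.List.pyGetD cs i d))
            (if i = 0 then iv else lk (PySem.List.pyGetD cs (i - 1) d)))
        = ((cs.map lk).zip (iv :: (cs.map lk).dropLast)).map (fun q => g q.1 q.2) := by
  intro cs
  induction cs with
  | nil => intro iv; simp [PySem.List.pyRange_one_eq_nil]
  | cons c t ih =>
    intro iv
    have hzip : (t.map lk).zip ((lk c :: t.map lk).dropLast)
        = (t.map lk).zip (lk c :: (t.map lk).dropLast) := by
      cases t with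
      | nil => simp
      | cons e es => rfl
    have hlen : ((c :: t).length : Int) = (t.length : Int) + 1 := by
      simp
    have hshift : PySem.List.pyRange (0 + 1) ((t.length : Int) + 1) 1
        = (PySem.List.pyRange 0 (t.length : Int) 1).map (· + 1) :=
      pyRange_one_shift 0 (t.length : Int)
    rw [hlen, PySem.List.pyRange_one_cons (by omega), List.map_cons, hshift, List.map_map]
    simp only [List.map_cons, List.zip_cons_cons, hzip]
    congr 1
    · simp [PySem.List.pyGetD_zero_cons]
    · rw [← ih (lk c)]
      apply List.map_congr_left
      intro i hi
      have hmem := PySem.List.mem_pyRange_one.mp hi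
      have h2 : ¬ (i + 1 = 0) := by omega
      simp only [Function.comp_apply, h2, if_false]
      have h3 : i + 1 - 1 = i := by ring
      rw [h3]
      have h4 : PySem.List.pyGetD (c :: t) (i + 1) d = PySem.List.pyGetD t i d := by
        rw [PySem.List.pyGetD_of_nonneg _ _ (by omega),
            PySem.List.pyGetD_of_nonneg _ _ (by omega)]
        have : (i + 1).toNat = i.toNat + 1 := by omega
        rw [this, List.getD_cons_succ]
      rw [h4]
      by_cases hiz : i = 0
      · subst hiz; simp [PySem.List.pyGetD_zero_cons]
      · simp only [hiz, if_false]
        rw [PySem.List.pyGetD_of_nonneg (c :: t) (i := i) d (by omega),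
            PySem.List.pyGetD_of_nonneg t (i := i - 1) d (by omega)]
        have : i.toNat = (i - 1).toNat + 1 := by omega
        rw [this, List.getD_cons_succ]

-- ===== VERDICT (by name: the statement is the Claim_ definition above) =====
theorem decrypt_cbc_caesar_spec : Claim_equal_decrypt_cbc_caesar := by
  intro ciphertext key iv alphabet _ _
  unfold Spec_decrypt_cbc_caesar decrypt_cbc_caesar decrypt_cbc_caesar_alt
  simp only [cbc_foldl_eq_zip, List.nil_append, PySem.List.foldl_append_singleton_eq_map,
    PySem.List.pyRange_neg_one_eq_reverse, List.map_reverse, List.reverse_reverse]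
  have h1 : (-1 : Int) + 1 = 0 := by ring
  have h2 : ((ciphertext.toList.length : Int) - 1) + 1 = (ciphertext.toList.length : Int) := by
    ring
  rw [h1, h2,
    cbc_index_eq_zip (fun ch => (PySem.Dict.mk alphabet).getD (String.mk [ch]) 0)
      (fun c p => Char.ofNat (65 + PySem.Int.mod (c - key - p) 26).toNat) ' '
      ciphertext.toList iv]
  simp only [List.map_map, Function.comp_def]
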